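-- pv_equiv track=rewrite | github.com/larriera/uba-intprogramacion | guia8.py | es_comentario_valido
-- ===== SOURCE A (Python) =====
-- def es_comentario_valido(linea: str) -> bool:
--     valido: bool = True
--     no_termine: bool = True
--     i: int = 0
--     while no_termine and (i < len(linea)):
--         if (linea[i] != " ") and (linea[i] != "\t"):
--             valido = linea[i] != "#"
--             no_termine = False
--         i += 1
--     return valido
-- ===== SOURCE B (Python) =====
-- def es_comentario_valido(linea: str) -> bool:
--     # Reversed decomposition: locate the first '#', then the line is a comment
--     # exactly when everything before it is spaces/tabs.
--     idx = linea.find('#')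
--     if idx == -1:
--         return True
--     return any(c != ' ' and c != '\t' for c in linea[:idx])
-- ===== Notes on version B (the rewrite author's own statement) =====
-- stated objective: alternative
-- what changed: Instead of scanning forward over leading whitespace with flags, B first searches for the first hash mark with str.find and then decides by whether the prefix before it contains any non-space/tab character; absence of a hash mark means valid.
import Mathlib
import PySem

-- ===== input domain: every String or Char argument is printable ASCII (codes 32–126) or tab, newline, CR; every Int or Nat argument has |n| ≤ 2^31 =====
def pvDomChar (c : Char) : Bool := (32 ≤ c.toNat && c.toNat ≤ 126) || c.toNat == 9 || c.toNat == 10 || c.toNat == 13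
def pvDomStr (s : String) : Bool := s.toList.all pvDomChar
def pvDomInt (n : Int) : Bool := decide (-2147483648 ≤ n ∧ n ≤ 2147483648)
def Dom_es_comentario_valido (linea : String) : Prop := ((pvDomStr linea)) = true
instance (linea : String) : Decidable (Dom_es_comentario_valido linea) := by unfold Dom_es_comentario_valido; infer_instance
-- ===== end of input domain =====

-- B reverses the decomposition: instead of A's whitespace-skipping loop with flags, it
-- locates the first '#' (str.find) and checks the prefix before it for a non-space/tab char.


-- ===== PORT A =====
-- the while loop: advance i while the char is ' ' or '\t'; at the first other char set
-- valido := (char ≠ '#') and stop (no_termine := false); if the string runs out, valido stays true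
def esComentarioLoop : List Char → Bool
  | [] => true
  | c :: rest => if c != ' ' && c != '\t' then c != '#' else esComentarioLoop rest

def es_comentario_valido (linea : String) : Bool :=
  esComentarioLoop linea.toList

-- ===== PORT B =====
def es_comentario_valido_alt (linea : String) : Bool :=
  -- idx = linea.find('#')
  let idx := PySem.Str.find linea "#"
  if idx == -1 then true
  else
    -- any(c != ' ' and c != '\t' for c in linea[:idx])
    (PySem.Str.slice linea none (some idx)).toList.any (fun c => c != ' ' && c != '\t')

-- ===== PRECONDITION & SPEC =====
def Spec_es_comentario_valido (linea : String) (out : Bool) : Prop := out = es_comentario_valido_alt linea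
instance (linea : String) (out : Bool) : Decidable (Spec_es_comentario_valido linea out) := by unfold Spec_es_comentario_valido; infer_instance

-- ===== CLAIM (what is proved, stated in full; the proofs are below) =====
def Claim_equal_es_comentario_valido : Prop := ∀ (linea : String), Dom_es_comentario_valido linea → Spec_es_comentario_valido linea (es_comentario_valido linea)

-- ===== LEMMAS AND PROOFS =====

-- if '#' does not occur, A's loop ends with valido = true
theorem esComentarioLoop_no_hash (l : List Char) (h : '#' ∉ l) : esComentarioLoop l = true := by
  induction l with
  | nil => rfl
  | cons c rest ih =>
    simp only [List.mem_cons, not_or] at h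
    by_cases hc : (c != ' ' && c != '\t') = true
    · simp [esComentarioLoop, hc, Ne.symm h.1]
    · simp [esComentarioLoop, hc, ih h.2]

-- if the first '#' is at position j, A's loop answers: is there a non-space/tab char before j?
theorem esComentarioLoop_hash (l : List Char) (j : ℕ)
    (hj : l[j]? = some '#') (hfirst : ∀ i < j, l[i]? ≠ some '#') :
    esComentarioLoop l = (l.take j).any (fun c => c != ' ' && c != '\t') := by
  induction l generalizing j with
  | nil => simp at hj
  | cons c rest ih =>
    cases j with
    | zero =>
      simp only [List.getElem?_cons_zero, Option.some.injEq] at hj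
      subst hj
      simp [esComentarioLoop]
    | succ k =>
      simp only [List.getElem?_cons_succ] at hj
      have hc : c ≠ '#' := by
        intro hcc; exact hfirst 0 (Nat.succ_pos k) (by simp [hcc])
      by_cases hws : (c != ' ' && c != '\t') = true
      · simp [esComentarioLoop, hws, hc, List.take_succ_cons, List.any_cons]
      · have : esComentarioLoop rest = (rest.take k).any (fun c => c != ' ' && c != '\t') := by
          refine ih k hj ?_
          intro i hi hmem
          exact hfirst (i + 1) (by omega) (by simpa using hmem)
        simp only [Bool.and_eq_true, bne_iff_ne, ne_eq, not_and, not_not] at hws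
        have hcase : c = ' ' ∨ c = '\t' := by
          by_cases hsp : c = ' '
          · exact Or.inl hsp
          · exact Or.inr (hws hsp)
        rcases hcase with h | h <;> simp [esComentarioLoop, h, List.take_succ_cons, this]

-- ===== VERDICT (by name: the statement is the Claim_ definition above) =====
theorem es_comentario_valido_spec : Claim_equal_es_comentario_valido := by
  intro linea _
  unfold Spec_es_comentario_valido es_comentario_valido es_comentario_valido_alt
  have hsub : "#".toList = ['#'] := rfl
  have hfind : PySem.Str.find linea "#" = PySem.Chars.find linea.toList ['#'] := by
    rw [PySem.Str.find_eq, hsub]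
  by_cases h : PySem.Str.find linea "#" = -1
  · have hnot : ¬ ['#'] <:+: linea.toList := by
      rw [← hsub]
      exact (PySem.Str.find_eq_neg_one_iff _ _).mp h
    have hmem : '#' ∉ linea.toList := by
      intro hm
      obtain ⟨s, t, hst⟩ := List.append_of_mem hm
      exact hnot ⟨s, t, by rw [hst]; simp⟩
    simp [esComentarioLoop_no_hash _ hmem]
    exact Or.inl (by rw [← hfind]; exact h)
  · have h0 : 0 ≤ PySem.Chars.find linea.toList ['#'] := by
      have := PySem.Chars.neg_one_le_find linea.toList ['#']
      rw [hfind] at h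
      omega
    obtain ⟨hpre, hmin⟩ := PySem.Chars.find_spec h0
    set jn := (PySem.Chars.find linea.toList ['#']).toNat with hjn
    have hidx : PySem.Str.find linea "#" = (jn : Int) := by
      rw [hfind]
      exact (Int.toNat_of_nonneg h0).symm
    have hj : linea.toList[jn]? = some '#' := by
      obtain ⟨r, hr⟩ := hpre
      have h0' : (linea.toList.drop jn)[0]? = some '#' := by
        rw [← hr]; rfl
      simpa [List.getElem?_drop] using h0'
    have hfirst : ∀ i < jn, linea.toList[i]? ≠ some '#' := by
      intro i hi hcontra
      apply hmin i hi
      have hdrop : (linea.toList.drop i)[0]? = some '#' := by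
        simpa [List.getElem?_drop] using hcontra
      match hd : linea.toList.drop i with
      | [] => rw [hd] at hdrop; simp at hdrop
      | c :: r =>
        rw [hd] at hdrop
        simp at hdrop
        exact ⟨r, by simp [hdrop]⟩
    have hslice : (PySem.Str.slice linea none (some (PySem.Str.find linea "#"))).toList
        = linea.toList.take jn := by
      rw [PySem.Str.toList_slice, hidx, PySem.Chars.slice_eq_listSlice,
        PySem.List.slice_to_natCast]
    have hne : (PySem.Str.find linea "#" == -1) = false := by simpa using h
    simp only [hne, Bool.false_eq_true, if_false, hslice,
      esComentarioLoop_hash linea.toList jn hj hfirst]
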